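-- pv_equiv track=rewrite | github.com/maerifat/SarabCraft | attacks/text/pwws.py | _compile_perturbed_tokens
-- ===== SOURCE A (Python) =====
-- def _compile_perturbed_tokens(words: list[str], substitutions: dict[int, str]) -> list[str]:
--     """Build token list with substitutions applied at given positions."""
--     result = []
--     for i, word in enumerate(words):
--         if i in substitutions:
--             result.append(substitutions[i].replace('_', ' '))
--         else:
--             result.append(word)
--     return result
-- ===== SOURCE B (Python) =====
-- def _compile_perturbed_tokens(words: list[str], substitutions: dict[int, str]) -> list[str]:
--     """Build token list with substitutions applied at given positions."""
--     result = list(words)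
--     n = len(words)
--     for i, s in substitutions.items():
--         if 0 <= i < n:
--             result[i] = s.replace('_', ' ')
--     return result
-- ===== Notes on version B (the rewrite author's own statement) =====
-- stated objective: alternative
-- what changed: B copies the word list once and drives the computation off the substitution dict (overwriting result[i] for each in-range key), instead of scanning every word and membership-testing it against the dict.
import Mathlib
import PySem

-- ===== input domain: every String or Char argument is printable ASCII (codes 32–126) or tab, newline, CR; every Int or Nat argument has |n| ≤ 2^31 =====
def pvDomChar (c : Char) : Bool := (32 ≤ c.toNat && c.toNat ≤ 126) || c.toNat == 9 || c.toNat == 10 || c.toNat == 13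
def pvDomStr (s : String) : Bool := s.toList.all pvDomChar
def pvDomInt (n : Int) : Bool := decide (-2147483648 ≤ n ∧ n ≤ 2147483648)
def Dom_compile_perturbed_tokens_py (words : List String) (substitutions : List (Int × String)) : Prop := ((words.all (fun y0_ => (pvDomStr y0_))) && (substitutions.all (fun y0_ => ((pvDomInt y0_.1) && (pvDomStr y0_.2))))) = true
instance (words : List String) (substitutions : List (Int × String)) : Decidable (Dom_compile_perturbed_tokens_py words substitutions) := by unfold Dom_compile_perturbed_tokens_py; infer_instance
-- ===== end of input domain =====

-- B copies the word list once and then overwrites positions driven by the substitution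
-- dict (with a bounds guard), instead of scanning every word and membership-testing it;
-- an alternative decomposition of the same cost.


-- ===== PORT A =====
-- loop over enumerate(words), appending either the replaced substitution (first match
-- in the association list = Python dict lookup) or the word itself
def compile_perturbed_tokens_py (words : List String) (substitutions : List (Int × String)) : List String :=
  (PySem.List.enumerate words 0).foldl
    (fun result p =>
      match substitutions.lookup p.1 with
      | some s => result ++ [PySem.Str.replace s "_" " "]
      | none => result ++ [p.2]) []

-- ===== PORT B =====
-- result = list(words); for (i, s) in substitutions: if 0 <= i < len(words): result[i] = s.replace('_',' ')
def compile_perturbed_tokens_py_alt (words : List String) (substitutions : List (Int × String)) : List String :=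
  substitutions.foldl
    (fun result p =>
      if 0 ≤ p.1 ∧ p.1 < (words.length : Int) then
        result.set p.1.toNat (PySem.Str.replace p.2 "_" " ")
      else result) words

-- ===== PRECONDITION & SPEC =====
-- Pre_ requires the association-list keys to be pairwise distinct: a Python dict always
-- has distinct keys, so this excludes no input the Python function is ever called on
-- (it only rules out assoc lists that do not represent a dict, where A's first-match
-- lookup and B's left-to-right overwrite could disagree).
def Pre_compile_perturbed_tokens_py (words : List String) (substitutions : List (Int × String)) : Prop :=
  (substitutions.map (·.1)).Nodup
instance (words : List String) (substitutions : List (Int × String)) : Decidable (Pre_compile_perturbed_tokens_py words substitutions) := by unfold Pre_compile_perturbed_tokens_py; infer_instance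

def pvWitness_compile_perturbed_tokens_py : List String × (List (Int × String)) :=
  (["the", "cat", "sat"], [(1, "big_dog"), (5, "ignored"), (-1, "also_ignored")])

def Spec_compile_perturbed_tokens_py (words : List String) (substitutions : List (Int × String)) (out : List String) : Prop := out = compile_perturbed_tokens_py_alt words substitutions
instance (words : List String) (substitutions : List (Int × String)) (out : List String) : Decidable (Spec_compile_perturbed_tokens_py words substitutions out) := by unfold Spec_compile_perturbed_tokens_py; infer_instance

-- ===== CLAIM (what is proved, stated in full; the proofs are below) =====
def Claim_equal_compile_perturbed_tokens_py : Prop := ∀ (words : List String) (substitutions : List (Int × String)), Dom_compile_perturbed_tokens_py words substitutions → Pre_compile_perturbed_tokens_py words substitutions → Spec_compile_perturbed_tokens_py words substitutions (compile_perturbed_tokens_py words substitutions)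

-- ===== LEMMAS AND PROOFS =====

-- appending one element per iteration is a map
theorem pv_foldl_append_map {α β : Type} (f : α → β) (l : List α) (acc : List β) :
    l.foldl (fun r x => r ++ [f x]) acc = acc ++ l.map f := by
  induction l generalizing acc with
  | nil => simp
  | cons x xs ih => simp [List.foldl, ih]

theorem pv_lookup_not_mem {β : Type} (l : List (Int × β)) (x : Int)
    (h : x ∉ l.map (·.1)) : l.lookup x = none := by
  induction l with
  | nil => rfl
  | cons p rest ih =>
    simp only [List.map_cons, List.mem_cons, not_or] at h
    have : (x == p.1) = false := by simpa using h.1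
    simp [List.lookup, this, ih h.2]

theorem pvA_char (words : List String) (substitutions : List (Int × String)) :
    compile_perturbed_tokens_py words substitutions =
      (PySem.List.enumerate words 0).map
        (fun p => match substitutions.lookup p.1 with
          | some s => PySem.Str.replace s "_" " "
          | none => p.2) := by
  unfold compile_perturbed_tokens_py
  rw [show (fun (result : List String) (p : Int × String) =>
      match substitutions.lookup p.1 with
      | some s => result ++ [PySem.Str.replace s "_" " "]
      | none => result ++ [p.2]) =
    (fun result p => result ++ [match substitutions.lookup p.1 with
      | some s => PySem.Str.replace s "_" " "
      | none => p.2]) from by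
      funext r p; cases substitutions.lookup p.1 <;> rfl]
  exact pv_foldl_append_map _ _ []

-- peeling one substitution off A's side, when its key does not recur
theorem pvA_step (words : List String) (i : Int) (s : String) (rest : List (Int × String))
    (hni : i ∉ rest.map (·.1)) :
    compile_perturbed_tokens_py words ((i, s) :: rest) =
      compile_perturbed_tokens_py
        (if 0 ≤ i ∧ i < (words.length : Int) then
          words.set i.toNat (PySem.Str.replace s "_" " ") else words)
        rest := by
  rw [pvA_char, pvA_char]
  apply List.ext_getElem
  · by_cases h : 0 ≤ i ∧ i < (words.length : Int) <;> simp [h]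
  · intro k h1 h2
    simp only [List.length_map, PySem.List.length_enumerate] at h1 h2
    have hklen : k < words.length := h1
    simp only [List.getElem_map, PySem.List.getElem_enumerate]
    have hk : (0 : Int) + k = (k : Int) := by omega
    rw [hk]
    have hlookup : ((i, s) :: rest).lookup (k : Int) =
        if i = (k : Int) then some s else rest.lookup (k : Int) := by
      by_cases hik : i = (k : Int)
      · simp [List.lookup, hik]
      · have : ((k : Int) == i) = false := by simpa using fun e => hik e.symm
        simp [List.lookup, this, hik]
    rw [hlookup]
    by_cases hik : i = (k : Int)
    · -- key i is exactly this position; it cannot recur in rest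
      have hrest : rest.lookup (k : Int) = none := pv_lookup_not_mem rest _ (hik ▸ hni)
      have hrange : 0 ≤ i ∧ i < (words.length : Int) := ⟨by omega, by omega⟩
      have hkn : i.toNat = k := by omega
      simp [hik, hrest, hklen]
    · by_cases hr : 0 ≤ i ∧ i < (words.length : Int)
      · have hkn : i.toNat ≠ k := by omega
        cases hl : rest.lookup (k : Int) with
        | none => simp [hik, hr, hkn]
        | some v => simp [hik]
      · cases hl : rest.lookup (k : Int) with
        | none => simp [hik, hr]
        | some v => simp [hik, hr]

theorem pv_main (substitutions : List (Int × String)) (words : List String)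
    (hnd : (substitutions.map (·.1)).Nodup) :
    compile_perturbed_tokens_py words substitutions =
      compile_perturbed_tokens_py_alt words substitutions := by
  induction substitutions generalizing words with
  | nil =>
    rw [pvA_char]
    unfold compile_perturbed_tokens_py_alt
    simp [List.lookup, PySem.List.map_snd_enumerate]
  | cons p rest ih =>
    obtain ⟨i, s⟩ := p
    simp only [List.map_cons, List.nodup_cons] at hnd
    rw [pvA_step words i s rest hnd.1]
    by_cases h : 0 ≤ i ∧ i < (words.length : Int)
    · rw [if_pos h]
      have := ih (words.set i.toNat (PySem.Str.replace s "_" " ")) hnd.2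
      unfold compile_perturbed_tokens_py_alt at this ⊢
      simp only [List.foldl_cons, List.length_set] at this ⊢
      simpa [h] using this
    · rw [if_neg h]
      have := ih words hnd.2
      unfold compile_perturbed_tokens_py_alt at this ⊢
      simp only [List.foldl_cons] at this ⊢
      simpa [h] using this

-- ===== VERDICT (by name: the statement is the Claim_ definition above) =====
theorem compile_perturbed_tokens_py_spec : Claim_equal_compile_perturbed_tokens_py := by
  intro words substitutions _ hpre
  exact pv_main substitutions words hpre
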